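-- pv_equiv track=rewrite | github.com/pranaovs/college-notes | Semester-2/CS1002-Programming_in_Python/Practice/02-Strings/16-Letter_Replace.py | replace_first_letter
-- ===== SOURCE A (Python) =====
-- def replace_first_letter(sentence):
--     words = sentence.split()
--     new_words = []
--     for word in words:
--         if word[0].isalpha():
--             new_letter = chr(ord(word[0]) + 1)
--             new_word = new_letter + word[1:]
--         else:
--             new_word = word
--         new_words.append(new_word)
--     return " ".join(new_words)
-- ===== SOURCE B (Python) =====
-- def replace_first_letter(sentence):
--     out = []
--     at_start = True
--     for ch in sentence:
--         if ch.isspace():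
--             at_start = True
--         elif at_start:
--             if out:
--                 out.append(' ')
--             out.append(chr(ord(ch) + 1) if ch.isalpha() else ch)
--             at_start = False
--         else:
--             out.append(ch)
--     return ''.join(out)
-- ===== Notes on version B (the rewrite author's own statement) =====
-- stated objective: alternative
-- what changed: Replaces split-into-a-word-list plus a per-word loop with a single left-to-right character scan that tracks a word-start flag and emits the (possibly shifted) characters and separating spaces directly.
import Mathlib
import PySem

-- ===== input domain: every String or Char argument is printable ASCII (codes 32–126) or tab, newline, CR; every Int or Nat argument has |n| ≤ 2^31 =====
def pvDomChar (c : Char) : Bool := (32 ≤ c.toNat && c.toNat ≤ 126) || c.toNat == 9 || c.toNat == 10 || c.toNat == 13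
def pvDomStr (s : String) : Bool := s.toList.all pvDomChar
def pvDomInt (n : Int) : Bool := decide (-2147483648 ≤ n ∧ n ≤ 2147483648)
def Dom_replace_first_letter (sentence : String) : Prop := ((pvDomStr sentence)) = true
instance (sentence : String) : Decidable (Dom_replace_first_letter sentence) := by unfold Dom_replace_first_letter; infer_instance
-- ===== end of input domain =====

-- B replaces A's split-into-words-then-loop with a single left-to-right pass over the
-- characters that builds the output directly (objective: alternative, same cost).

-- ===== PORT A =====
-- word[0]/word[1:] are ported by matching on the word's characters: split() yields only
-- nonempty words, so the indexing never raises (the [] branch is unreachable).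
def replace_first_letter (sentence : String) : String :=
  let words := PySem.Str.split₀ sentence
  let new_words := words.foldl (fun acc word =>
    acc ++ [match word.toList with
            | [] => word
            | c :: rest =>
              if PySem.Chars.isalpha c then
                String.ofList (Char.ofNat (c.toNat + 1) :: rest)
              else word]) ([] : List String)
  PySem.Str.join " " new_words

-- ===== PORT B =====
def replace_first_letter_alt (sentence : String) : String :=
  String.ofList
    ((sentence.toList.foldl
      (fun (st : List Char × Bool) ch =>
        if PySem.Chars.isspace ch then (st.1, true)
        else if st.2 then
          (st.1 ++ (if st.1.isEmpty then [] else [' ']) ++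
            [if PySem.Chars.isalpha ch then Char.ofNat (ch.toNat + 1) else ch], false)
        else (st.1 ++ [ch], false))
      (([] : List Char), true)).1)

-- ===== PRECONDITION & SPEC =====
def Spec_replace_first_letter (sentence : String) (out : String) : Prop := out = replace_first_letter_alt sentence
instance (sentence : String) (out : String) : Decidable (Spec_replace_first_letter sentence out) := by unfold Spec_replace_first_letter; infer_instance

-- ===== CLAIM (what is proved, stated in full; the proofs are below) =====
def Claim_equal_replace_first_letter : Prop := ∀ (sentence : String), Dom_replace_first_letter sentence → Spec_replace_first_letter sentence (replace_first_letter sentence)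

-- ===== LEMMAS AND PROOFS =====

-- A's per-word transformation, at the character-list level.
def pvT (w : List Char) : List Char :=
  match w with
  | [] => []
  | c :: rest => if PySem.Chars.isalpha c then Char.ofNat (c.toNat + 1) :: rest else c :: rest

-- B's loop body, named so the key lemma can speak about it.
def pvStep (st : List Char × Bool) (ch : Char) : List Char × Bool :=
  if PySem.Chars.isspace ch then (st.1, true)
  else if st.2 then
    (st.1 ++ (if st.1.isEmpty then [] else [' ']) ++
      [if PySem.Chars.isalpha ch then Char.ofNat (ch.toNat + 1) else ch], false)
  else (st.1 ++ [ch], false)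

lemma pvStep_eq :
    (fun (st : List Char × Bool) ch =>
      if PySem.Chars.isspace ch then (st.1, true)
      else if st.2 then
        (st.1 ++ (if st.1.isEmpty then [] else [' ']) ++
          [if PySem.Chars.isalpha ch then Char.ofNat (ch.toNat + 1) else ch], false)
      else (st.1 ++ [ch], false)) = pvStep := rfl

def pvJ (acc : List (List Char)) : List Char :=
  PySem.Chars.join [' '] (List.map pvT acc.reverse)

def pvOut (cur : List Char) (acc : List (List Char)) : List Char :=
  if cur.isEmpty then pvJ acc
  else pvJ acc ++ (if acc.isEmpty then [] else [' ']) ++ pvT cur.reverse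

lemma pv_join_snoc (l : List (List Char)) (w : List Char) :
    PySem.Chars.join [' '] (l ++ [w])
      = PySem.Chars.join [' '] l ++ (if l.isEmpty then [] else [' ']) ++ w := by
  induction l with
  | nil => simp [PySem.Chars.join_nil, PySem.Chars.join_singleton]
  | cons p l ih =>
    cases l with
    | nil => simp [PySem.Chars.join_singleton, PySem.Chars.join_cons_cons]
    | cons q r =>
      rw [show (p :: q :: r) ++ [w] = p :: q :: (r ++ [w]) from rfl,
          PySem.Chars.join_cons_cons,
          show q :: (r ++ [w]) = (q :: r) ++ [w] from rfl, ih]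
      simp [PySem.Chars.join_cons_cons]

lemma pvT_ne_nil {w : List Char} (h : w ≠ []) : pvT w ≠ [] := by
  cases w with
  | nil => exact absurd rfl h
  | cons c rest => simp [pvT]; split <;> simp

lemma pvJ_isEmpty {acc : List (List Char)} (h : ∀ w ∈ acc, w ≠ []) :
    (pvJ acc).isEmpty = acc.isEmpty := by
  cases acc with
  | nil => simp [pvJ, PySem.Chars.join_nil]
  | cons a as =>
    have ha : pvT a ≠ [] := pvT_ne_nil (h a (List.mem_cons_self))
    simp only [pvJ, List.reverse_cons, List.map_append, List.map_cons, List.map_nil,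
      pv_join_snoc]
    simp [ha]

lemma pvT_snoc {w : List Char} (h : w ≠ []) (c : Char) :
    pvT (w ++ [c]) = pvT w ++ [c] := by
  cases w with
  | nil => exact absurd rfl h
  | cons a t => simp [pvT]; split <;> simp

lemma pvJ_snoc (acc : List (List Char)) (w : List Char) :
    pvJ (w :: acc) = pvJ acc ++ (if acc.isEmpty then [] else [' ']) ++ pvT w := by
  simp only [pvJ, List.reverse_cons, List.map_append, List.map_cons, List.map_nil,
    pv_join_snoc]
  simp

lemma pv_key (cs : List Char) : ∀ (cur : List Char) (acc : List (List Char)),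
    (∀ w ∈ acc, w ≠ []) →
    (List.foldl pvStep (pvOut cur acc, cur.isEmpty) cs).1
      = PySem.Chars.join [' '] (List.map pvT (PySem.Chars.split₀.go cs cur acc)) := by
  induction cs with
  | nil =>
    intro cur acc h
    cases cur with
    | nil => simp [PySem.Chars.split₀.go, pvOut, pvJ]
    | cons d t =>
      simp only [List.foldl_nil, PySem.Chars.split₀.go, List.isEmpty_cons,
        Bool.false_eq_true, reduceIte]
      rw [show List.map pvT ((d :: t).reverse :: acc).reverse
            = List.map pvT (acc.reverse ++ [(d :: t).reverse]) by simp,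
          List.map_append, List.map_cons, List.map_nil, pv_join_snoc]
      simp [pvOut, pvJ]
  | cons c rest ih =>
    intro cur acc h
    rw [List.foldl_cons]
    by_cases hs : PySem.Chars.isspace c = true
    · cases cur with
      | nil =>
        have : pvStep (pvOut [] acc, true) c = (pvOut [] acc, true) := by
          simp [pvStep, hs]
        rw [show ([] : List Char).isEmpty = true from rfl, this,
            show (true = ([] : List Char).isEmpty) from rfl, ih [] acc h]
        simp [PySem.Chars.split₀.go, hs]
      | cons d t =>
        have hstep : pvStep (pvOut (d :: t) acc, (d :: t).isEmpty) c
            = (pvOut [] ((d :: t).reverse :: acc), ([] : List Char).isEmpty) := by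
          simp only [pvStep, hs, if_pos]
          simp [pvOut, pvJ_snoc]
        rw [hstep, ih [] ((d :: t).reverse :: acc)
            (fun w hw => by
              rw [List.mem_cons] at hw
              cases hw with
              | inl h1 => rw [h1]; simp
              | inr h1 => exact h w h1)]
        simp [PySem.Chars.split₀.go, hs]
    · cases cur with
      | nil =>
        have hstep : pvStep (pvOut [] acc, true) c
            = (pvOut [c] acc, ([c] : List Char).isEmpty) := by
          by_cases ha : PySem.Chars.isalpha c = true <;>
            simp [pvStep, hs, ha, pvOut, pvT, pvJ_isEmpty h]
        rw [show ([] : List Char).isEmpty = true from rfl, hstep, ih [c] acc h]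
        simp [PySem.Chars.split₀.go, hs]
      | cons d t =>
        have hstep : pvStep (pvOut (d :: t) acc, (d :: t).isEmpty) c
            = (pvOut (c :: d :: t) acc, (c :: d :: t).isEmpty) := by
          simp only [pvStep, hs, Bool.false_eq_true, reduceIte, List.isEmpty_cons]
          simp only [pvOut, List.isEmpty_cons, Bool.false_eq_true, reduceIte]
          rw [show (c :: d :: t).reverse = (d :: t).reverse ++ [c] by simp,
              pvT_snoc (by simp)]
          simp
        rw [hstep, ih (c :: d :: t) acc h]
        simp [PySem.Chars.split₀.go, hs]

lemma pvA_word (word : String) :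
    String.toList (match word.toList with
      | [] => word
      | c :: rest =>
        if PySem.Chars.isalpha c then String.ofList (Char.ofNat (c.toNat + 1) :: rest)
        else word) = pvT word.toList := by
  rcases hw : word.toList with _ | ⟨c, rest⟩
  · have h2 := congrArg String.ofList hw
    rw [String.ofList_toList] at h2
    simp [pvT, h2]
  · simp only [pvT]
    split <;> simp_all

-- ===== VERDICT (by name: the statement is the Claim_ definition above) =====
theorem replace_first_letter_spec : Claim_equal_replace_first_letter := by
  intro s _
  unfold Spec_replace_first_letter replace_first_letter replace_first_letter_alt
  rw [pvStep_eq]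
  have h0 : (∀ w ∈ ([] : List (List Char)), w ≠ []) := by simp
  have hkey := pv_key s.toList [] [] h0
  simp only [pvOut, List.isEmpty_nil, if_pos, pvJ, List.reverse_nil, List.map_nil,
    PySem.Chars.join_nil] at hkey
  rw [hkey]
  simp only [PySem.List.foldl_append_singleton_eq_map, List.nil_append]
  rw [show PySem.Chars.split₀.go s.toList [] [] = PySem.Chars.split₀ s.toList from rfl]
  simp only [PySem.Str.join, PySem.Str.split₀, List.map_map]
  congr 1
  rw [show (" ".toList) = [' '] from rfl]
  congr 1
  refine List.map_congr_left ?_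
  intro w _
  simp only [Function.comp_apply]
  rw [pvA_word]
  simp
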